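-- pv_equiv track=rewrite | github.com/eastlabsphoto/spine-swiss-knife | spine_swiss_knife/draw_order_core.py | iter_group_reducing_block_moves
-- ===== SOURCE A (Python) =====
-- from collections.abc import Iterable, Iterator
--
-- def count_blend_groups(slots: list[dict]) -> int:
--     """Count contiguous blend-mode groups (~ draw calls)."""
--     if not slots:
--         return 0
--     groups = 1
--     prev = slots[0].get("blend", "normal")
--     for slot in slots[1:]:
--         cur = slot.get("blend", "normal")
--         if cur != prev:
--             groups += 1
--             prev = cur
--     return groups
--
-- def iter_group_reducing_block_moves(slots: list[dict]) -> Iterator[list[dict]]: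
--     """Yield group-reducing candidates made by moving contiguous runs.
--
--     Each candidate preserves internal order of the moved run. Results are
--     yielded best-first by draw-group reduction, then by move distance.
--     """
--     if len(slots) <= 1:
--         return
--
--     base_groups = count_blend_groups(slots)
--     seen: set[tuple[str, ...]] = set()
--     scored: list[tuple[int, int, int, int, list[dict]]] = []
--
--     i = 0
--     while i < len(slots):
--         blend = slots[i].get("blend", "normal")
--         j = i + 1
--         while j < len(slots) and slots[j].get("blend", "normal") == blend:
--             j += 1
--
--         block = slots[i:j]
--         remainder = slots[:i] + slots[j:]
--         for insert_pos in range(len(remainder) + 1):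
--             candidate = remainder[:insert_pos] + block + remainder[insert_pos:]
--             if candidate == slots:
--                 continue
--             new_groups = count_blend_groups(candidate)
--             if new_groups >= base_groups:
--                 continue
--
--             signature = tuple(slot.get("name", "") for slot in candidate)
--             if signature in seen:
--                 continue
--             seen.add(signature)
--
--             saved = base_groups - new_groups
--             move_distance = abs(insert_pos - i)
--             scored.append((-saved, move_distance, i, insert_pos, candidate))
--
--         i = j
--
--     scored.sort(key=lambda item: item[:4])
--     for _saved, _distance, _start, _insert, candidate in scored:
--         yield candidate
-- ===== SOURCE B (Python) =====
-- def iter_group_reducing_block_moves(slots):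
--     """Same candidates, best-first; new group counts are derived from the run's
--     boundary blends instead of rescanning each candidate, and candidates and
--     signatures are built only for surviving moves."""
--     n = len(slots)
--     if n <= 1:
--         return
--     blends = [s.get("blend", "normal") for s in slots]
--
--     def g(bl):
--         if not bl:
--             return 0
--         return 1 + sum(1 for a, b in zip(bl, bl[1:]) if a != b)
--
--     base = g(blends)
--     seen = set()
--     scored = []
--     i = 0
--     while i < n:
--         v = blends[i]
--         j = i + 1
--         while j < n and blends[j] == v:
--             j += 1
--         rb = blends[:i] + blends[j:]
--         m = len(rb)
--         gr = g(rb)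
--         for p in range(m + 1):
--             newg = gr + 1
--             if p > 0 and rb[p - 1] == v:
--                 newg -= 1
--             if p < m and rb[p] == v:
--                 newg -= 1
--             if 0 < p < m and rb[p - 1] == rb[p]:
--                 newg += 1
--             if newg >= base:
--                 continue
--             remainder = slots[:i] + slots[j:]
--             candidate = remainder[:p] + slots[i:j] + remainder[p:]
--             signature = tuple(s.get("name", "") for s in candidate)
--             if signature in seen:
--                 continue
--             seen.add(signature)
--             scored.append((-(base - newg), abs(p - i), i, p, candidate))
--         i = j
--     scored.sort(key=lambda item: item[:4])
--     for item in scored: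
--         yield item[4]
-- ===== Notes on version B (the rewrite author's own statement) =====
-- stated objective: alternative
-- what changed: B computes the blend list once and derives each candidate's new group count from the run's boundary blends via an append-count formula, building the candidate list and its name signature only for moves that actually reduce groups, instead of materialising every candidate and rescanning it with count_blend_groups; the redundant candidate==slots check is subsumed by the group filter.
import Mathlib
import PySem

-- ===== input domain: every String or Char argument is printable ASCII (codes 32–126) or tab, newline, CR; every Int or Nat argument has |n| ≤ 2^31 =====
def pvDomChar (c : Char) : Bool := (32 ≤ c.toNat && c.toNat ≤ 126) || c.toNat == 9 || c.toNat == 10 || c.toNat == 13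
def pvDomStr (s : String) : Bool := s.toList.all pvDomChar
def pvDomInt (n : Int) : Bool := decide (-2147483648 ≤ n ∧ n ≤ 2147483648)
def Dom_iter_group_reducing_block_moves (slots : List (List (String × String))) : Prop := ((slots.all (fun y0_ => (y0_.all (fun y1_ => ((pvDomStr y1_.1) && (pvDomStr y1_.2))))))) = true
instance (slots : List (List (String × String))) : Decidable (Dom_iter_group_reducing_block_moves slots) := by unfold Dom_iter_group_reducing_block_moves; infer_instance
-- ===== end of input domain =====

-- B derives each candidate's new group count from the run's boundary blends (an append-count
-- formula) and builds candidates/signatures only for group-reducing moves, instead of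
-- materialising and rescanning every candidate; same returned list.

-- slot.get(key, default) on a dict given as an association list (first match wins)
def pvGetD (slot : List (String × String)) (k dflt : String) : String :=
  PySem.Dict.getD ⟨slot⟩ k dflt

-- ===== PORT A =====
def count_blend_groups (slots : List (List (String × String))) : Int :=
  match slots with
  | [] => 0
  | s0 :: rest =>
    (rest.foldl (fun st slot =>
        let cur := pvGetD slot "blend" "normal"
        if cur ≠ st.2 then (st.1 + 1, cur) else st)
      ((1 : Int), pvGetD s0 "blend" "normal")).1

-- Python's dict == (order-insensitive: same keys, same values)
def pvDictEq (d1 d2 : List (String × String)) : Bool :=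
  (d1.map Prod.fst).all (fun k => PySem.Dict.get? ⟨d2⟩ k == PySem.Dict.get? ⟨d1⟩ k) &&
  (d2.map Prod.fst).all (fun k => PySem.Dict.get? ⟨d1⟩ k == PySem.Dict.get? ⟨d2⟩ k)

-- Python's == on two lists of dicts
def pvListEq (xs ys : List (List (String × String))) : Bool :=
  xs.length == ys.length && (xs.zip ys).all (fun p => pvDictEq p.1 p.2)

-- A's inner while loop: advance j while slots[j] has the same blend
def pvRunEndA (slots : List (List (String × String))) (blend : String) (j : Nat) : Nat :=
  if h : j < slots.length then
    if pvGetD slots[j] "blend" "normal" = blend then pvRunEndA slots blend (j+1) else j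
  else j
termination_by slots.length - j

-- needed by pvScoreA's termination
theorem pvRunEndA_ge (slots : List (List (String × String))) (blend : String) (j : Nat) :
    j ≤ pvRunEndA slots blend j := by
  fun_induction pvRunEndA <;> omega

abbrev pvEntry := Int × Int × Int × Int × List (List (String × String))

-- A's outer while loop, threading (seen, scored)
def pvScoreA (slots : List (List (String × String))) (base : Int) (i : Nat)
    (seen : PySem.Set (List String)) (scored : List pvEntry) : List pvEntry :=
  if h : i < slots.length then
    let blend := pvGetD slots[i] "blend" "normal"
    let j := pvRunEndA slots blend (i+1)
    let block := PySem.List.slice slots (some (i : Int)) (some (j : Int))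
    let remainder := PySem.List.slice slots none (some (i : Int)) ++
                     PySem.List.slice slots (some (j : Int)) none
    let st := (PySem.List.pyRange 0 ((remainder.length : Int) + 1) 1).foldl
      (fun st p =>
        let candidate := PySem.List.slice remainder none (some p) ++ block ++
                         PySem.List.slice remainder (some p) none
        if pvListEq candidate slots then st
        else
          let new_groups := count_blend_groups candidate
          if base ≤ new_groups then st
          else
            let signature := candidate.map (fun slot => pvGetD slot "name" "")
            if signature ∈ st.1 then st
            else (PySem.Set.add st.1 signature,
                  st.2 ++ [(-(base - new_groups), |p - (i : Int)|, (i : Int), p, candidate)]))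
      (seen, scored)
    pvScoreA slots base j st.1 st.2
  else scored
termination_by slots.length - i
decreasing_by have := pvRunEndA_ge slots (pvGetD slots[i] "blend" "normal") (i+1); omega

-- sort key item[:4], compared as Python compares 4-tuples (lexicographically)
def pvKey (t : pvEntry) : Lex (Int × Lex (Int × Lex (Int × Int))) :=
  toLex (t.1, toLex (t.2.1, toLex (t.2.2.1, t.2.2.2.1)))

def iter_group_reducing_block_moves (slots : List (List (String × String))) :
    List (List (List (String × String))) :=
  if slots.length ≤ 1 then []
  else
    let base := count_blend_groups slots
    let scored := pvScoreA slots base 0 PySem.Set.empty []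
    (PySem.List.sorted scored pvKey false).map (fun t => t.2.2.2.2)

-- ===== PORT B =====
-- Source B's g: 1 + number of adjacent unequal pairs
def pvGroupsB (bl : List String) : Int :=
  match bl with
  | [] => 0
  | _ :: _ => 1 + ((bl.zip bl.tail).countP (fun ab => ab.1 ≠ ab.2) : Int)

-- B's inner while loop on the precomputed blends
def pvRunEndB (blends : List String) (v : String) (j : Nat) : Nat :=
  if h : j < blends.length then
    if blends[j] = v then pvRunEndB blends v (j+1) else j
  else j
termination_by blends.length - j

-- needed by pvScoreB's termination
theorem pvRunEndB_ge (blends : List String) (v : String) (j : Nat) :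
    j ≤ pvRunEndB blends v j := by
  fun_induction pvRunEndB <;> omega

-- B's outer while loop: boundary-formula group count per insert position, candidates for survivors only
def pvScoreB (slots : List (List (String × String))) (blends : List String) (base : Int)
    (i : Nat) (seen : PySem.Set (List String)) (scored : List pvEntry) : List pvEntry :=
  if h : i < blends.length then
    let v := blends[i]
    let j := pvRunEndB blends v (i+1)
    let rb := PySem.List.slice blends none (some (i : Int)) ++
              PySem.List.slice blends (some (j : Int)) none
    let m := rb.length
    let gr := pvGroupsB rb
    let st := (PySem.List.pyRange 0 ((m : Int) + 1) 1).foldl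
      (fun st p =>
        let n0 := gr + 1
        let n1 := if 0 < p ∧ PySem.List.pyGetD rb (p - 1) "" = v then n0 - 1 else n0
        let n2 := if p < (m : Int) ∧ PySem.List.pyGetD rb p "" = v then n1 - 1 else n1
        let newg := if 0 < p ∧ p < (m : Int) ∧
                       PySem.List.pyGetD rb (p - 1) "" = PySem.List.pyGetD rb p "" then
                      n2 + 1 else n2
        if base ≤ newg then st
        else
          let remainder := PySem.List.slice slots none (some (i : Int)) ++
                           PySem.List.slice slots (some (j : Int)) none
          let candidate := PySem.List.slice remainder none (some p) ++
                           PySem.List.slice slots (some (i : Int)) (some (j : Int)) ++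
                           PySem.List.slice remainder (some p) none
          let signature := candidate.map (fun slot => pvGetD slot "name" "")
          if signature ∈ st.1 then st
          else (PySem.Set.add st.1 signature,
                st.2 ++ [(-(base - newg), |p - (i : Int)|, (i : Int), p, candidate)]))
      (seen, scored)
    pvScoreB slots blends base j st.1 st.2
  else scored
termination_by blends.length - i
decreasing_by have := pvRunEndB_ge blends blends[i] (i+1); omega

def iter_group_reducing_block_moves_alt (slots : List (List (String × String))) :
    List (List (List (String × String))) :=
  if slots.length ≤ 1 then []
  else
    let blends := slots.map (fun s => pvGetD s "blend" "normal")
    let base := pvGroupsB blends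
    let scored := pvScoreB slots blends base 0 PySem.Set.empty []
    (PySem.List.sorted scored pvKey false).map (fun t => t.2.2.2.2)

-- ===== PRECONDITION & SPEC =====
def Spec_iter_group_reducing_block_moves (slots : List (List (String × String))) (out : List (List (List (String × String)))) : Prop := out = iter_group_reducing_block_moves_alt slots
instance (slots : List (List (String × String))) (out : List (List (List (String × String)))) : Decidable (Spec_iter_group_reducing_block_moves slots out) := by unfold Spec_iter_group_reducing_block_moves; infer_instance

-- ===== CLAIM (what is proved, stated in full; the proofs are below) =====
def Claim_equal_iter_group_reducing_block_moves : Prop := ∀ (slots : List (List (String × String))), Dom_iter_group_reducing_block_moves slots → Spec_iter_group_reducing_block_moves slots (iter_group_reducing_block_moves slots)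

-- ===== LEMMAS AND PROOFS =====

def pvBlend (slot : List (String × String)) : String := pvGetD slot "blend" "normal"

-- the group count A computes over slots is Source B's g of the blend list
theorem pv_fold_count (rest : List (List (String × String))) :
    ∀ (g : Int) (prev : String),
      (rest.foldl (fun st slot =>
          let cur := pvGetD slot "blend" "normal"
          if cur ≠ st.2 then (st.1 + 1, cur) else st) (g, prev)).1
        = g + (((prev :: rest.map pvBlend).zip (rest.map pvBlend)).countP
            (fun ab => ab.1 ≠ ab.2) : Int) := by
  induction rest with
  | nil => intro g prev; simp
  | cons r rest ih =>
    intro g prev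
    simp only [List.foldl_cons, List.map_cons, List.zip_cons_cons, List.countP_cons]
    by_cases hc : pvBlend r = prev
    · simp only [pvBlend] at hc
      simp only [hc, ne_eq, not_true_eq_false, if_false, ih g prev]
      simp [pvBlend, hc]
    · simp only [pvBlend] at hc
      simp only [ne_eq, hc, not_false_eq_true, if_true, ih (g+1) (pvGetD r "blend" "normal")]
      have hne : ¬ (prev = pvGetD r "blend" "normal") := fun h => hc h.symm
      simp [pvBlend, hne]
      omega

theorem pv_count_eq (slots : List (List (String × String))) :
    count_blend_groups slots = pvGroupsB (slots.map pvBlend) := by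
  cases slots with
  | nil => rfl
  | cons s0 rest =>
    simp only [count_blend_groups, pv_fold_count rest 1 (pvGetD s0 "blend" "normal")]
    simp [pvGroupsB, pvBlend]

-- seam correction term for concatenations
def pvSeam (xs ys : List String) : Int :=
  match xs.getLast?, ys.head? with
  | some a, some b => if a = b then 1 else 0
  | _, _ => 0

theorem pvGroupsB_cons_cons (a b : String) (l : List String) :
    pvGroupsB (a :: b :: l) = (if a = b then 0 else 1) + pvGroupsB (b :: l) := by
  simp only [pvGroupsB, List.tail_cons, List.zip_cons_cons, List.countP_cons]
  by_cases h : a = b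
  · simp [h]
  · simp [h]; ring

theorem pvGroupsB_append (xs ys : List String) :
    pvGroupsB (xs ++ ys) = pvGroupsB xs + pvGroupsB ys - pvSeam xs ys := by
  induction xs with
  | nil => simp [pvSeam, pvGroupsB]
  | cons a xs ih =>
    cases xs with
    | nil =>
      cases ys with
      | nil => simp [pvSeam, pvGroupsB]
      | cons b ys' =>
        simp only [List.singleton_append, pvGroupsB_cons_cons, pvSeam]
        simp [pvGroupsB]
        by_cases h : a = b <;> simp [h]
    | cons c xs' =>
      have h1 : (a :: c :: xs') ++ ys = a :: c :: (xs' ++ ys) := rfl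
      rw [h1, pvGroupsB_cons_cons]
      have h2 : (c :: (xs' ++ ys)) = (c :: xs') ++ ys := rfl
      rw [h2, ih, pvGroupsB_cons_cons]
      have h3 : pvSeam (a :: c :: xs') ys = pvSeam (c :: xs') ys := by
        simp [pvSeam, List.getLast?_cons_cons]
      rw [h3]; ring

theorem pvGroupsB_uniform (bl : List String) (v : String)
    (h : ∀ x ∈ bl, x = v) (hne : bl ≠ []) :
    pvGroupsB bl = 1 ∧ bl.head? = some v ∧ bl.getLast? = some v := by
  induction bl with
  | nil => exact absurd rfl hne
  | cons a bl ih =>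
    have ha : a = v := h a (List.mem_cons_self)
    cases bl with
    | nil => simp [pvGroupsB, ha]
    | cons b bl' =>
      have ih' := ih (fun x hx => h x (List.mem_cons_of_mem a hx)) (by simp)
      have hb : b = v := h b (by simp)
      refine ⟨?_, by simp [ha], by simpa [List.getLast?_cons_cons] using ih'.2.2⟩
      rw [pvGroupsB_cons_cons, if_pos (ha.trans hb.symm)]
      simp [ih'.1]

-- the O(1) boundary formula equals the rescanned group count
theorem pvFormula (rbb blockbl : List String) (v : String) (k : Nat)
    (hk : k ≤ rbb.length) (hb : blockbl ≠ []) (hu : ∀ x ∈ blockbl, x = v) :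
    pvGroupsB (rbb.take k ++ (blockbl ++ rbb.drop k))
      = pvGroupsB rbb + 1
        - (if 0 < k ∧ rbb.getD (k-1) "" = v then 1 else 0)
        - (if k < rbb.length ∧ rbb.getD k "" = v then 1 else 0)
        + (if 0 < k ∧ k < rbb.length ∧ rbb.getD (k-1) "" = rbb.getD k "" then 1 else 0) := by
  have hus := pvGroupsB_uniform blockbl v hu hb
  have htd : rbb.take k ++ rbb.drop k = rbb := List.take_append_drop k rbb
  have hlt : (rbb.take k).length = k := by simp [hk]
  have hheadB : (blockbl ++ rbb.drop k).head? = some v := by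
    cases blockbl with
    | nil => exact absurd rfl hb
    | cons x xs => simpa using hus.2.1
  have hlastX : (rbb.take k).getLast? = (rbb.take k)[k - 1]? := by
    rw [List.getLast?_eq_getElem?, hlt]
  have hX : 0 < k → (rbb.take k).getLast? = some (rbb.getD (k - 1) "") := by
    intro h0
    have hk1 : k - 1 < rbb.length := by omega
    rw [hlastX, List.getElem?_take, if_pos (by omega), List.getElem?_eq_getElem hk1,
      List.getD_eq_getElem rbb "" hk1]
  have hX0 : k = 0 → (rbb.take k).getLast? = none := by
    intro h0; subst h0; simp
  have hY : k < rbb.length → (rbb.drop k).head? = some (rbb.getD k "") := by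
    intro hkm
    rw [List.head?_drop, List.getElem?_eq_getElem hkm, List.getD_eq_getElem rbb "" hkm]
  have hY0 : ¬ k < rbb.length → (rbb.drop k).head? = none := by
    intro hkm; rw [List.head?_drop]; exact List.getElem?_eq_none_iff.mpr (by omega)
  have e1 : pvSeam (rbb.take k) (blockbl ++ rbb.drop k)
      = if 0 < k ∧ rbb.getD (k-1) "" = v then 1 else 0 := by
    by_cases h0 : 0 < k
    · simp [pvSeam, hX h0, hheadB, h0]
    · simp [pvSeam, hX0 (by omega), h0]
  have e2 : pvSeam blockbl (rbb.drop k)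
      = if k < rbb.length ∧ rbb.getD k "" = v then 1 else 0 := by
    by_cases hkm : k < rbb.length
    · simp [pvSeam, hus.2.2, hY hkm, hkm, eq_comm]
    · simp [pvSeam, hus.2.2, hY0 hkm, hkm]
  have e3 : pvSeam (rbb.take k) (rbb.drop k)
      = if 0 < k ∧ k < rbb.length ∧ rbb.getD (k-1) "" = rbb.getD k "" then 1 else 0 := by
    by_cases h0 : 0 < k
    · by_cases hkm : k < rbb.length
      · simp [pvSeam, hX h0, hY hkm, h0, hkm]
      · simp [pvSeam, hY0 hkm, hkm]
    · simp [pvSeam, hX0 (by omega), h0]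
  have hG : pvGroupsB rbb = pvGroupsB (rbb.take k) + pvGroupsB (rbb.drop k)
      - (if 0 < k ∧ k < rbb.length ∧ rbb.getD (k-1) "" = rbb.getD k "" then 1 else 0) := by
    conv_lhs => rw [← htd]
    rw [pvGroupsB_append, e3]
  rw [pvGroupsB_append (rbb.take k) (blockbl ++ rbb.drop k),
    pvGroupsB_append blockbl (rbb.drop k), e1, e2, hus.1, hG]
  ring

theorem pv_keys_mk (d : List (String × String)) :
    (PySem.Dict.mk d).keys = d.map Prod.fst := rfl

theorem pvDictEq_get? (d1 d2 : List (String × String)) (h : pvDictEq d1 d2 = true)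
    (k : String) : PySem.Dict.get? ⟨d1⟩ k = PySem.Dict.get? ⟨d2⟩ k := by
  unfold pvDictEq at h
  rw [Bool.and_eq_true, List.all_eq_true, List.all_eq_true] at h
  by_cases h1 : k ∈ d1.map Prod.fst
  · have := h.1 k h1
    exact (beq_iff_eq.mp this).symm
  · have hn1 : PySem.Dict.get? (⟨d1⟩ : PySem.Dict String String) k = none := by
      rw [PySem.Dict.get?_eq_none_iff_not_mem_keys]
      rw [pv_keys_mk]; exact h1
    by_cases h2 : k ∈ d2.map Prod.fst
    · have := h.2 k h2
      exact beq_iff_eq.mp this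
    · have hn2 : PySem.Dict.get? (⟨d2⟩ : PySem.Dict String String) k = none := by
        rw [PySem.Dict.get?_eq_none_iff_not_mem_keys]
        rw [pv_keys_mk]; exact h2
      rw [hn1, hn2]

theorem pvDictEq_getD (d1 d2 : List (String × String)) (h : pvDictEq d1 d2 = true)
    (k dflt : String) : pvGetD d1 k dflt = pvGetD d2 k dflt := by
  unfold pvGetD
  rw [PySem.Dict.getD_eq_get?_getD, PySem.Dict.getD_eq_get?_getD, pvDictEq_get? d1 d2 h k]

theorem pvListEq_map (xs ys : List (List (String × String))) (h : pvListEq xs ys = true)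
    (k dflt : String) :
    xs.map (fun d => pvGetD d k dflt) = ys.map (fun d => pvGetD d k dflt) := by
  unfold pvListEq at h
  rw [Bool.and_eq_true, beq_iff_eq, List.all_eq_true] at h
  obtain ⟨hlen, hall⟩ := h
  apply List.ext_getElem (by simp [hlen])
  intro i h1 h2
  have h1' : i < xs.length := by simpa using h1
  simp only [List.getElem_map]
  have hz : i < (xs.zip ys).length := by simp [List.length_zip]; omega
  have := hall (xs.zip ys)[i] (List.getElem_mem hz)
  rw [List.getElem_zip] at this
  exact pvDictEq_getD _ _ this k dflt

theorem pvRunEnd_bridge (slots : List (List (String × String))) (v : String) (j : Nat) :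
    pvRunEndA slots v j = pvRunEndB (slots.map pvBlend) v j := by
  fun_induction pvRunEndA with
  | case1 j h hb ih =>
    rw [pvRunEndB, dif_pos (by simpa using h)]
    rw [if_pos (by simpa [pvBlend] using hb)]
    exact ih
  | case2 j h hb =>
    rw [pvRunEndB, dif_pos (by simpa using h)]
    rw [if_neg (by simpa [pvBlend] using hb)]
  | case3 j h =>
    rw [pvRunEndB, dif_neg (by simpa using h)]

theorem pvRunEndB_le (bl : List String) (v : String) (j : Nat) (h : j ≤ bl.length) :
    pvRunEndB bl v j ≤ bl.length := by
  fun_induction pvRunEndB <;> omega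

theorem pvRunEndB_run (bl : List String) (v : String) (j : Nat) :
    ∀ k (hk : k < bl.length), j ≤ k → k < pvRunEndB bl v j → bl[k] = v := by
  fun_induction pvRunEndB with
  | case1 j h hb ih =>
    intro k hk hjk hkr
    by_cases hkj : k = j
    · subst hkj; exact hb
    · exact ih k hk (by omega) hkr
  | case2 j h hb => intro k hk hjk hkr; omega
  | case3 j h => intro k hk hjk hkr; omega

theorem pvScore_glue (slots : List (List (String × String))) (bl : List String) (base : Int)
    (j : Nat) (FA FB : PySem.Set (List String) × List pvEntry) (hF : FA = FB)
    (hrec : pvScoreA slots base j FA.1 FA.2 = pvScoreB slots bl base j FA.1 FA.2) :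
    pvScoreA slots base j FA.1 FA.2 = pvScoreB slots bl base j FB.1 FB.2 := hF ▸ hrec

theorem pvStep_newg (G C : Int) (c1 c2 c3 : Prop) [Decidable c1] [Decidable c2] [Decidable c3]
    (h : C = G + 1 - (if c1 then 1 else 0) - (if c2 then 1 else 0) + (if c3 then 1 else 0)) :
    (if c3 then (if c2 then (if c1 then G + 1 - 1 else G + 1) - 1
                 else (if c1 then G + 1 - 1 else G + 1)) + 1
     else (if c2 then (if c1 then G + 1 - 1 else G + 1) - 1
           else (if c1 then G + 1 - 1 else G + 1))) = C := by
  subst h; split_ifs <;> ring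

theorem pvScore_eq (slots : List (List (String × String))) (bl : List String)
    (hbl : bl = slots.map pvBlend) (base : Int) (hbase : base = pvGroupsB bl) :
    ∀ d i seen scored, slots.length - i ≤ d →
      pvScoreA slots base i seen scored = pvScoreB slots bl base i seen scored := by
  have hbln : bl.length = slots.length := by subst hbl; simp
  intro d
  induction d with
  | zero =>
    intro i seen scored hle
    rw [pvScoreA, dif_neg (by omega), pvScoreB, dif_neg (by omega)]
  | succ d ih =>
    intro i seen scored hle
    by_cases hi : i < slots.length
    · have hib : i < bl.length := by omega
      rw [pvScoreA, dif_pos hi, pvScoreB, dif_pos hib]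
      have hv : pvGetD slots[i] "blend" "normal" = bl[i] := by
        subst hbl; simp [pvBlend]
      have hbr : pvRunEndA slots bl[i] (i+1) = pvRunEndB bl bl[i] (i+1) := by
        rw [pvRunEnd_bridge, ← hbl]
      simp only [hv, hbr]
      have hj1 : i < pvRunEndB bl bl[i] (i+1) := by
        have := pvRunEndB_ge bl bl[i] (i+1); omega
      have hj2 : pvRunEndB bl bl[i] (i+1) ≤ bl.length := pvRunEndB_le bl bl[i] (i+1) (by omega)
      have hrun : ∀ k (hk : k < bl.length), i ≤ k → k < pvRunEndB bl bl[i] (i+1) →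
          bl[k] = bl[i] := by
        intro k hk hik hkr
        rcases Nat.eq_or_lt_of_le hik with h | h
        · subst h; rfl
        · exact pvRunEndB_run bl bl[i] (i+1) k hk h hkr
      generalize hJ : pvRunEndB bl bl[i] (i+1) = j at *
      simp only [PySem.List.slice_to_natCast, PySem.List.slice_from_natCast,
        PySem.List.slice_natCast]
      have hm : (List.take i bl ++ List.drop j bl).length
          = (List.take i slots ++ List.drop j slots).length := by
        subst hbl; simp
      rw [hm]
      refine pvScore_glue slots bl base j _ _ ?_ (ih j _ _ (by omega))
      apply PySem.List.foldl_congr_mem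
      intro acc p hp
      rw [PySem.List.mem_pyRange_one] at hp
      obtain ⟨k, rfl⟩ : ∃ k : ℕ, p = (k : Int) := ⟨p.toNat, (Int.toNat_of_nonneg hp.1).symm⟩
      have hkR : k ≤ (List.take i slots ++ List.drop j slots).length := by omega
      have hkRB : k ≤ (List.take i bl ++ List.drop j bl).length := by omega
      simp only [PySem.List.slice_to_natCast, PySem.List.slice_from_natCast]
      have hbne : List.take (j - i) (List.drop i bl) ≠ [] := by
        apply List.ne_nil_of_length_pos
        simp only [List.length_take, List.length_drop]
        omega
      have hbu : ∀ x ∈ List.take (j - i) (List.drop i bl), x = bl[i] := by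
        intro x hx
        rw [List.mem_iff_getElem] at hx
        obtain ⟨t, ht, rfl⟩ := hx
        have ht' : t < j - i := by
          simp only [List.length_take, List.length_drop] at ht; omega
        rw [List.getElem_take, List.getElem_drop]
        exact hrun (i + t) (by omega) (by omega) (by omega)
      have hcnt : count_blend_groups
          (List.take k (List.take i slots ++ List.drop j slots) ++
            List.take (j - i) (List.drop i slots) ++
            List.drop k (List.take i slots ++ List.drop j slots))
          = pvGroupsB (List.take i bl ++ List.drop j bl) + 1
            - (if 0 < k ∧ (List.take i bl ++ List.drop j bl).getD (k-1) "" = bl[i]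
               then 1 else 0)
            - (if k < (List.take i slots ++ List.drop j slots).length ∧
                  (List.take i bl ++ List.drop j bl).getD k "" = bl[i] then 1 else 0)
            + (if 0 < k ∧ k < (List.take i slots ++ List.drop j slots).length ∧
                  (List.take i bl ++ List.drop j bl).getD (k-1) ""
                    = (List.take i bl ++ List.drop j bl).getD k "" then 1 else 0) := by
        rw [pv_count_eq]
        have hmapc : (List.take k (List.take i slots ++ List.drop j slots) ++
              List.take (j - i) (List.drop i slots) ++
              List.drop k (List.take i slots ++ List.drop j slots)).map pvBlend
            = (List.take i bl ++ List.drop j bl).take k ++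
              (List.take (j - i) (List.drop i bl) ++
               (List.take i bl ++ List.drop j bl).drop k) := by
          subst hbl
          simp [List.map_take, List.map_drop, List.append_assoc]
        rw [hmapc, pvFormula (List.take i bl ++ List.drop j bl)
          (List.take (j - i) (List.drop i bl)) bl[i] k hkRB hbne hbu, hm]
      have hc1 : (0 < (k : Int) ∧
            PySem.List.pyGetD (List.take i bl ++ List.drop j bl) ((k : Int) - 1) "" = bl[i])
          ↔ (0 < k ∧ (List.take i bl ++ List.drop j bl).getD (k-1) "" = bl[i]) := by
        by_cases h0 : 0 < k
        · have he : ((k : Int) - 1) = ((k - 1 : Nat) : Int) := by omega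
          rw [he, PySem.List.pyGetD_natCast]
          exact and_congr Nat.cast_pos Iff.rfl
        · exact iff_of_false (fun h => absurd h.1 (by omega)) (fun h => absurd h.1 h0)
      have hc2 : ((k : Int) < ((List.take i slots ++ List.drop j slots).length : Int) ∧
            PySem.List.pyGetD (List.take i bl ++ List.drop j bl) (k : Int) "" = bl[i])
          ↔ (k < (List.take i slots ++ List.drop j slots).length ∧
             (List.take i bl ++ List.drop j bl).getD k "" = bl[i]) := by
        rw [PySem.List.pyGetD_natCast]
        exact and_congr Nat.cast_lt Iff.rfl
      have hc3 : (0 < (k : Int) ∧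
            (k : Int) < ((List.take i slots ++ List.drop j slots).length : Int) ∧
            PySem.List.pyGetD (List.take i bl ++ List.drop j bl) ((k : Int) - 1) ""
              = PySem.List.pyGetD (List.take i bl ++ List.drop j bl) (k : Int) "")
          ↔ (0 < k ∧ k < (List.take i slots ++ List.drop j slots).length ∧
             (List.take i bl ++ List.drop j bl).getD (k-1) ""
               = (List.take i bl ++ List.drop j bl).getD k "") := by
        by_cases h0 : 0 < k
        · have he : ((k : Int) - 1) = ((k - 1 : Nat) : Int) := by omega
          rw [he, PySem.List.pyGetD_natCast, PySem.List.pyGetD_natCast]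
          exact and_congr Nat.cast_pos (and_congr Nat.cast_lt Iff.rfl)
        · exact iff_of_false (fun h => absurd h.1 (by omega)) (fun h => absurd h.1 h0)
      simp only [hc1, hc2, hc3]
      rw [pvStep_newg _ _ _ _ _ hcnt]
      by_cases hEq : pvListEq
          (List.take k (List.take i slots ++ List.drop j slots) ++
            List.take (j - i) (List.drop i slots) ++
            List.drop k (List.take i slots ++ List.drop j slots)) slots = true
      · rw [if_pos hEq]
        have hfun : pvBlend = (fun d => pvGetD d "blend" "normal") := rfl
        have hcb : count_blend_groups
            (List.take k (List.take i slots ++ List.drop j slots) ++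
              List.take (j - i) (List.drop i slots) ++
              List.drop k (List.take i slots ++ List.drop j slots)) = base := by
          rw [pv_count_eq, hbase, hbl]
          congr 1
          rw [hfun]
          exact pvListEq_map _ _ hEq "blend" "normal"
        rw [hcb, if_pos (le_refl base)]
      · rw [if_neg hEq]
    · rw [pvScoreA, dif_neg hi, pvScoreB, dif_neg (by omega)]

-- ===== VERDICT (by name: the statement is the Claim_ definition above) =====
theorem iter_group_reducing_block_moves_spec : Claim_equal_iter_group_reducing_block_moves := by
  intro slots _
  unfold Spec_iter_group_reducing_block_moves
  unfold iter_group_reducing_block_moves iter_group_reducing_block_moves_alt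
  by_cases h : slots.length ≤ 1
  · simp [h]
  · simp only [h, if_false]
    rw [pv_count_eq slots, pvScore_eq slots (slots.map pvBlend) rfl _ rfl slots.length 0
      PySem.Set.empty [] (by omega)]
    rfl
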